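-- pv_equiv track=rewrite | github.com/Saiko15/python-for-data-science | Section (12) - Lists/medium to hard homework/3.py | is_susequance
-- ===== SOURCE A (Python) =====
-- def is_susequance(lst1, lst2):
--     for idx in range(len(lst2)):
--         if lst2[idx] not in lst1:
--             return False
--         elif idx != 0:
--             if lst1.index(lst2[idx]) < lst1.index(lst2[idx-1]):
--                 return False
--
--     return True
-- ===== SOURCE B (Python) =====
-- def is_susequance(lst1, lst2):
--     positions = []
--     for element in lst2:
--         if element not in lst1:
--             return False
--         positions.append(lst1.index(element))
--     return positions == sorted(positions)
-- ===== Notes on version B (the rewrite author's own statement) =====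
-- stated objective: simpler
-- what changed: Replaces A's index-based loop with adjacent-pair lst1.index comparisons by a single pass that collects first-occurrence positions and decides monotonicity via positions == sorted(positions).
import Mathlib
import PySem

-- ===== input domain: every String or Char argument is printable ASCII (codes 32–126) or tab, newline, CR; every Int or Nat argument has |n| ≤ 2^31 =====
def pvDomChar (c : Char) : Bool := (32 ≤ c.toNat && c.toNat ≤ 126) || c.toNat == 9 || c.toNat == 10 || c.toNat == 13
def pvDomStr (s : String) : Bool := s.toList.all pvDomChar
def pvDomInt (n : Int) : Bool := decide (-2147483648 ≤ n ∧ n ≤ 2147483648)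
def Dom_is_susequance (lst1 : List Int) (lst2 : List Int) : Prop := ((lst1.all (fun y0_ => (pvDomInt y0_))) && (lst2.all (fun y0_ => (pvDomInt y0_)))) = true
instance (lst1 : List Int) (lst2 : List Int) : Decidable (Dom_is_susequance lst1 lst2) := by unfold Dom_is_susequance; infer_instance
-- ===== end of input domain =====

-- B replaces A's adjacent-pair lst1.index comparisons by collecting first-occurrence
-- positions in one pass and checking positions == sorted(positions); objective: simpler.


-- ===== PORT A =====
-- 'for idx in range(len(lst2))' with early returns: structural recursion on the number
-- of remaining iterations (rem), idx the current index. lst1.index(e) is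
-- PySem.List.index?; '.getD 0' is only reached after the membership check has
-- guaranteed 'some' (as in Python, where .index cannot raise there). lst2[idx] is
-- PySem.List.pyGetD; idx is always in range, exactly as in the Python loop.
def pyIndexD (lst1 : List Int) (v : Int) : Int :=
  ((PySem.List.index? lst1 v).map (Int.ofNat)).getD 0

def aLoop (lst1 : List Int) (lst2 : List Int) : Nat → Int → Bool
  | 0, _ => true
  | rem+1, idx =>
    if !(lst1.contains (PySem.List.pyGetD lst2 idx 0)) then false
    else if idx ≠ 0 then
      if pyIndexD lst1 (PySem.List.pyGetD lst2 idx 0) <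
          pyIndexD lst1 (PySem.List.pyGetD lst2 (idx-1) 0) then false
      else aLoop lst1 lst2 rem (idx+1)
    else aLoop lst1 lst2 rem (idx+1)

def is_susequance (lst1 : List Int) (lst2 : List Int) : Bool :=
  aLoop lst1 lst2 lst2.length 0

-- ===== PORT B =====
-- one pass over lst2 building 'positions', then positions == sorted(positions)
def bLoop (lst1 : List Int) (rest : List Int) (positions : List Int) : Bool :=
  match rest with
  | [] => positions == PySem.List.sorted positions (fun x => x) false
  | x :: xs =>
    if !(lst1.contains x) then false
    else bLoop lst1 xs (positions ++ [pyIndexD lst1 x])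

def is_susequance_alt (lst1 : List Int) (lst2 : List Int) : Bool := bLoop lst1 lst2 []

-- ===== PRECONDITION & SPEC =====
def Spec_is_susequance (lst1 : List Int) (lst2 : List Int) (out : Bool) : Prop := out = is_susequance_alt lst1 lst2
instance (lst1 : List Int) (lst2 : List Int) (out : Bool) : Decidable (Spec_is_susequance lst1 lst2 out) := by unfold Spec_is_susequance; infer_instance

-- ===== CLAIM (what is proved, stated in full; the proofs are below) =====
def Claim_equal_is_susequance : Prop := ∀ (lst1 : List Int) (lst2 : List Int), Dom_is_susequance lst1 lst2 → Spec_is_susequance lst1 lst2 (is_susequance lst1 lst2)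

-- ===== LEMMAS AND PROOFS =====

-- A's loop from index i ≥ 1 with lst2.length - i iterations left equals: the remaining
-- elements are all members, and the position sequence from index i-1 on is
-- adjacent-nondecreasing.
lemma aLoop_succ_spec (lst1 lst2 : List Int) :
    ∀ rem i, 1 ≤ i → rem = lst2.length - i →
    aLoop lst1 lst2 rem (i : Int) =
      ((lst2.drop i).all (lst1.contains ·) &&
       decide (List.IsChain (· ≤ ·) ((lst2.drop (i-1)).map (pyIndexD lst1)))) := by
  intro rem
  induction rem with
  | zero =>
    intro i h1 hrem
    have h : lst2.length ≤ i := by omega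
    have hd : lst2.drop i = [] := List.drop_eq_nil_of_le h
    rw [aLoop, hd]
    by_cases h2 : i - 1 < lst2.length
    · have hd2 : lst2.drop (i-1) = [lst2[i-1]'(by omega)] := by
        rw [List.drop_eq_getElem_cons h2]
        rw [show i - 1 + 1 = i by omega, hd]
      simp [hd2, List.IsChain.singleton]
    · simp [List.drop_eq_nil_of_le (by omega : lst2.length ≤ i - 1)]
  | succ rem ih =>
    intro i h1 hrem
    have h : i < lst2.length := by omega
    have hidx : i - 1 + 1 = i := by omega
    have hd1 : lst2.drop (i-1) = lst2[i-1]'(by omega) :: lst2.drop i := by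
      rw [List.drop_eq_getElem_cons (by omega : i - 1 < lst2.length), hidx]
    have hd : lst2.drop i = lst2[i] :: lst2.drop (i+1) :=
      List.drop_eq_getElem_cons h
    have hg : PySem.List.pyGetD lst2 (i : Int) 0 = lst2[i] := by
      rw [PySem.List.pyGetD_natCast, List.getD_eq_getElem lst2 0 h]
    have hg1 : PySem.List.pyGetD lst2 ((i : Int) - 1) 0 = lst2[i-1]'(by omega) := by
      rw [show (i : Int) - 1 = ((i - 1 : Nat) : Int) by omega,
        PySem.List.pyGetD_natCast, List.getD_eq_getElem lst2 0 (by omega)]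
    rw [aLoop, hg, hg1, if_pos (by exact_mod_cast by omega : (i : Int) ≠ 0)]
    by_cases hm : lst1.contains lst2[i]
    · rw [if_neg (by simpa using hm)]
      by_cases hlt : pyIndexD lst1 lst2[i] < pyIndexD lst1 (lst2[i-1]'(by omega))
      · rw [if_pos hlt, hd1, hd]
        simp only [List.map_cons, List.isChain_cons_cons]
        simp [not_le.mpr hlt]
      · have hle : pyIndexD lst1 (lst2[i-1]'(by omega)) ≤ pyIndexD lst1 lst2[i] :=
          not_lt.mp hlt
        rw [if_neg hlt, show (i : Int) + 1 = ((i + 1 : Nat) : Int) by omega,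
          ih (i+1) (by omega) (by omega), show i + 1 - 1 = i from rfl]
        conv_lhs => rw [hd]
        conv_rhs => rw [hd1, hd]
        simp only [List.map_cons, List.isChain_cons_cons, List.all_cons, hm, Bool.true_and]
        simp [hle]
    · have hmf : lst1.contains lst2[i] = false := by simpa using hm
      rw [if_pos (by simpa using hm), hd]
      simp only [List.all_cons, hmf, Bool.false_and]

-- A overall: all members and the whole position sequence is adjacent-nondecreasing.
lemma a_spec (lst1 lst2 : List Int) :
    is_susequance lst1 lst2 =
      (lst2.all (lst1.contains ·) &&
       decide (List.IsChain (· ≤ ·) (lst2.map (pyIndexD lst1)))) := by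
  unfold is_susequance
  rcases lst2 with _ | ⟨y, ys⟩
  · simp [aLoop]
  · rw [show (y :: ys : List Int).length = ys.length + 1 from rfl, aLoop,
      if_neg (by simp : ¬ (0 : Int) ≠ 0)]
    have hg : PySem.List.pyGetD (y :: ys) (0 : Int) 0 = y := by
      rw [PySem.List.pyGetD_zero]
      rfl
    rw [hg]
    by_cases hy : lst1.contains y
    · have hy' : y ∈ lst1 := by simpa using hy
      rw [if_neg (by simpa using hy),
        show (0 : Int) + 1 = ((1 : Nat) : Int) from rfl,
        aLoop_succ_spec lst1 (y :: ys) ys.length 1 (le_refl 1) (by simp)]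
      simp [hy']
      rfl
    · have hy' : y ∉ lst1 := by simpa using hy
      rw [if_pos (by simpa using hy)]
      simp [hy']

-- B's loop: remaining members, and (acc ++ remaining positions) equals its sort.
lemma bLoop_spec (lst1 : List Int) (rest acc : List Int) :
    bLoop lst1 rest acc =
      (rest.all (lst1.contains ·) &&
       ((acc ++ rest.map (pyIndexD lst1)) ==
         PySem.List.sorted (acc ++ rest.map (pyIndexD lst1)) (fun x => x) false)) := by
  induction rest generalizing acc with
  | nil => simp [bLoop]
  | cons x xs ih =>
    rw [bLoop]
    by_cases hm : lst1.contains x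
    · have hm' : x ∈ lst1 := by simpa using hm
      rw [if_neg (by simpa using hm), ih (acc ++ [pyIndexD lst1 x])]
      simp [hm']
    · have hm' : x ∉ lst1 := by simpa using hm
      rw [if_pos (by simpa using hm)]
      simp [hm']

-- positions == sorted(positions) is exactly adjacent-nondecreasing.
lemma self_eq_sorted_iff (ps : List Int) :
    (ps == PySem.List.sorted ps (fun x => x) false) = decide (List.IsChain (· ≤ ·) ps) := by
  by_cases hch : List.IsChain (· ≤ ·) ps
  · have hp : ps.Pairwise (fun a b => a ≤ b) := List.isChain_iff_pairwise.mp hch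
    rw [PySem.List.sorted_eq_self_of_pairwise ps (fun x => x) hp]
    simp [hch]
  · simp only [hch, decide_false]
    rw [beq_eq_false_iff_ne]
    intro heq
    have hp : ps.Pairwise (fun a b => a ≤ b) := by
      rw [heq]
      exact PySem.List.sorted_pairwise ps (fun x => x)
    exact hch (List.isChain_iff_pairwise.mpr hp)

-- ===== VERDICT (by name: the statement is the Claim_ definition above) =====
theorem is_susequance_spec : Claim_equal_is_susequance := by
  intro lst1 lst2 _
  unfold Spec_is_susequance is_susequance_alt
  rw [bLoop_spec, a_spec]
  simp only [List.nil_append]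
  rw [self_eq_sorted_iff]
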